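-- pv_equiv track=rewrite | github.com/vidagy/aoc | aoc/year_2024/task_04.py | count_words_in_row
-- ===== SOURCE A (Python) =====
-- def count_words_in_row(line: list[str]) -> int:
--     res = 0
--
--     if len(line) < 4:
--         return res
--
--     for i in range(len(line) - 3):
--         if "".join(line[i : i + 4]) == "XMAS":
--             res += 1
--
--     return res
-- ===== SOURCE B (Python) =====
-- def count_words_in_row(line: list[str]) -> int:
--     # One pass with a sliding window of the last three elements; no indexing, no
--     # length guard needed (simpler decomposition, same values as A).
--     res = 0
--     prev = []
--     for x in line:
--         if len(prev) == 3:
--             if "".join(prev + [x]) == "XMAS":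
--                 res += 1
--             prev = prev[1:] + [x]
--         else:
--             prev = prev + [x]
--     return res
-- ===== Notes on version B (the rewrite author's own statement) =====
-- stated objective: simpler
-- what changed: Replaced the length-guarded indexed loop with per-window slicing by a single forward pass that maintains a sliding window of the previous three elements, so no length check, no indices and no slices of the input are needed.
import Mathlib
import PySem

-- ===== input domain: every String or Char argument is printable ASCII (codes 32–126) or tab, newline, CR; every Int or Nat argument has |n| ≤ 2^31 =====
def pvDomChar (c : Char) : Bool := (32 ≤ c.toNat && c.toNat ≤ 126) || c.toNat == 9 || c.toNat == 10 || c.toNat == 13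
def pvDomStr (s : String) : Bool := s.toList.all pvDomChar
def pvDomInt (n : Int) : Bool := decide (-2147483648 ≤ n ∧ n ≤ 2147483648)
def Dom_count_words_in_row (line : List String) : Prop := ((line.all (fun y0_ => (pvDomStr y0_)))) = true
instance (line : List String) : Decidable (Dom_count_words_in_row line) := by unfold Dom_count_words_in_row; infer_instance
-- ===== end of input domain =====

-- B replaces A's length-guarded indexed slicing loop by a single pass with a sliding
-- window of the previous three elements (objective: simpler; same values everywhere).

-- ===== PORT A =====
def count_words_in_row (line : List String) : Int :=
  if line.length < 4 then 0
  else
    (PySem.List.pyRange 0 ((line.length : Int) - 3) 1).foldl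
      (fun res i =>
        if PySem.Str.join "" (PySem.List.slice line (some i) (some (i + 4))) = "XMAS" then
          res + 1
        else res) 0

-- ===== PORT B =====
def cwirStep (st : Int × List String) (x : String) : Int × List String :=
  match st with
  | (res, prev) =>
    if prev.length == 3 then
      ((if PySem.Str.join "" (prev ++ [x]) = "XMAS" then res + 1 else res),
        PySem.List.slice prev (some 1) none ++ [x])
    else (res, prev ++ [x])

def count_words_in_row_alt (line : List String) : Int :=
  (line.foldl cwirStep (0, [])).1

-- ===== PRECONDITION & SPEC =====
def Spec_count_words_in_row (line : List String) (out : Int) : Prop := out = count_words_in_row_alt line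
instance (line : List String) (out : Int) : Decidable (Spec_count_words_in_row line out) := by unfold Spec_count_words_in_row; infer_instance

-- ===== CLAIM (what is proved, stated in full; the proofs are below) =====
def Claim_equal_count_words_in_row : Prop := ∀ (line : List String), Dom_count_words_in_row line → Spec_count_words_in_row line (count_words_in_row line)

-- ===== LEMMAS AND PROOFS =====

/-- The number of length-4 windows of `xs` whose concatenation is `"XMAS"`. -/
def wcountN : List String → Nat
  | a :: b :: c :: d :: t =>
      (if PySem.Str.join "" [a, b, c, d] = "XMAS" then 1 else 0) + wcountN (b :: c :: d :: t)
  | _ => 0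

theorem rangeCount_eq_wcountN (xs : List String) :
    (List.range (xs.length - 3)).countP
      (fun i => decide (PySem.Str.join "" ((xs.drop i).take 4) = "XMAS")) = wcountN xs := by
  induction xs with
  | nil => rfl
  | cons a rest ih =>
    match rest with
    | [] => rfl
    | [b] => rfl
    | [b, c] => rfl
    | b :: c :: d :: t =>
      have hlen : (a :: b :: c :: d :: t).length - 3 = (t.length + 1) := by
        simp
      rw [hlen, List.range_succ_eq_map, List.countP_cons, List.countP_map]
      have hrest : (b :: c :: d :: t).length - 3 = t.length := by simp
      rw [hrest] at ih
      rw [wcountN]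
      have : ((List.range t.length).countP fun i =>
          decide (PySem.Str.join "" (((a :: b :: c :: d :: t).drop (i + 1)).take 4) = "XMAS")) =
          wcountN (b :: c :: d :: t) := by
        rw [← ih]
        rfl
      simp only [Function.comp_def, Nat.succ_eq_add_one]
      rw [this]
      simp only [List.drop_zero, List.take]
      by_cases h : PySem.Str.join "" [a, b, c, d] = "XMAS" <;> simp [h, Nat.add_comm]

theorem A_eq_wcountN (line : List String) :
    count_words_in_row line = (wcountN line : Int) := by
  unfold count_words_in_row
  by_cases h : line.length < 4
  · rw [if_pos h]
    match line, h with
    | [], _ => rfl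
    | [_], _ => rfl
    | [_, _], _ => rfl
    | [_, _, _], _ => rfl
  · rw [if_neg h]
    have hc : ((line.length : Int) - 3) = ((line.length - 3 : Nat) : Int) := by omega
    have hfun : (fun (res : Int) (i : Int) =>
        if PySem.Str.join "" (PySem.List.slice line (some i) (some (i + 4))) = "XMAS" then
          res + 1 else res)
        = (fun (res : Int) (i : Int) =>
            if (fun j : Int =>
                decide (PySem.Str.join "" (PySem.List.slice line (some j) (some (j + 4))) = "XMAS")) i
              = true then res + 1 else res) := by
      funext res i
      simp
    rw [hc, PySem.List.pyRange_zero_natCast, hfun, PySem.List.foldl_count_if, List.countP_map,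
      ← rangeCount_eq_wcountN]
    simp only [Int.zero_add]
    refine congrArg _ (List.countP_congr fun i _ => ?_)
    simp only [Function.comp_apply]
    have hcast : ((i : Int) + 4) = ((i : Int) + ((4 : Nat) : Int)) := by norm_num
    rw [hcast, PySem.List.slice_natCast_add]

theorem B_inv (l : List String) (a b c : String) (res : Int) :
    (l.foldl cwirStep (res, [a, b, c])).1 = res + (wcountN (a :: b :: c :: l) : Int) := by
  induction l generalizing a b c res with
  | nil => simp [wcountN]
  | cons x t ih =>
    rw [List.foldl_cons]
    have hstep : cwirStep (res, [a, b, c]) x =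
        ((if PySem.Str.join "" [a, b, c, x] = "XMAS" then res + 1 else res), [b, c, x]) := by
      simp [cwirStep, PySem.List.slice_from_one]
    rw [hstep, ih]
    rw [wcountN]
    by_cases h : PySem.Str.join "" [a, b, c, x] = "XMAS"
    · simp [h]
      ring
    · simp [h]

theorem B_eq_wcountN (line : List String) :
    count_words_in_row_alt line = (wcountN line : Int) := by
  match line with
  | [] => rfl
  | [_] => rfl
  | [_, _] => rfl
  | [_, _, _] => rfl
  | a :: b :: c :: x :: t =>
    unfold count_words_in_row_alt
    have h3 : (a :: b :: c :: x :: t).foldl cwirStep (0, []) =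
        (x :: t).foldl cwirStep (0, [a, b, c]) := by
      simp [cwirStep]
    rw [h3, B_inv]
    simp

-- ===== VERDICT (by name: the statement is the Claim_ definition above) =====
theorem count_words_in_row_spec : Claim_equal_count_words_in_row := by
  intro line _
  unfold Spec_count_words_in_row
  rw [A_eq_wcountN, B_eq_wcountN]
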